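-- pv_equiv track=rewrite | github.com/JawadKotaichh/Codeforces | Divisions/Div 2/Div 2 edu 168/A_strong_password.py | strong
-- ===== SOURCE A (Python) =====
-- def strong(s):
--     l="abcdefghigklmnopqrstuvwxyz"
--     if len(s)==1:
--         for j in l:
--             if s[0]!=j:
--                 return s[0]+j
--
--
--     for i in range(0,len(s)):
--         current=s[i]
--         if i!=len(s)-1:
--
--             if s[i+1]==current:
--                 for j in l:
--                     if s[i]!=j:
--                         return s[:i+1]+j+s[i+1:]
--         else:
--             if s[i-1]==s[i]:
--                 for j in l:
--                     if s[i]!=j: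
--                         return s[:i+1]+j+s[i+1:]
--             else:
--                 for j in l:
--                     if s[i]!=j:
--                         return s+j
-- ===== SOURCE B (Python) =====
-- def _firstdup(s, lo, hi):
--     """First index i in [lo, hi-1) with s[i] == s[i+1], else None (divide and conquer)."""
--     if hi - lo < 2:
--         return None
--     mid = (lo + hi) // 2
--     r = _firstdup(s, lo, mid)
--     if r is not None:
--         return r
--     if s[mid - 1] == s[mid]:
--         return mid - 1
--     return _firstdup(s, mid, hi)
--
-- def strong(s):
--     # The first character of A's alphabet "abcdefghigklmnopqrstuvwxyz" differing
--     # from c is, in closed form, 'b' when c == 'a' and 'a' otherwise.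
--     if not s:
--         return None
--     i = _firstdup(s, 0, len(s))
--     if i is None:
--         c = s[-1]
--         return s + ('b' if c == 'a' else 'a')
--     c = s[i]
--     return s[:i + 1] + ('b' if c == 'a' else 'a') + s[i + 1:]
-- ===== Notes on version B (the rewrite author's own statement) =====
-- stated objective: alternative
-- what changed: Replaced A's indexed three-branch linear loop with inner alphabet-table scans by a divide-and-conquer search for the first adjacent-duplicate index (left half, junction pair, right half) and a closed-form choice of the inserted character ('b' if the duplicate is 'a', else 'a'), eliminating the alphabet string, the len==1 special case and the dead last-index branch.
-- outside the precondition, e.g. on strong(''): A returns None, B returns None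
import Mathlib
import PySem

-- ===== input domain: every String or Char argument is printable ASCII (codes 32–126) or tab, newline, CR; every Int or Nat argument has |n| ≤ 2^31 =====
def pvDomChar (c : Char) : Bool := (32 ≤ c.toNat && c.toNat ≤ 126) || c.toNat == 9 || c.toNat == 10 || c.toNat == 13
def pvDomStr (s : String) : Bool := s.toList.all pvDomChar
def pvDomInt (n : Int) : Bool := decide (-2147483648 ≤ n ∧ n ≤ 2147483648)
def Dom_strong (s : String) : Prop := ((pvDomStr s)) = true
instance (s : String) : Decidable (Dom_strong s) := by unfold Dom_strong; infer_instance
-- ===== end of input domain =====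

-- B finds the first adjacent-duplicate index by divide and conquer and inserts a
-- closed-form character; equivalence on nonempty strings (A returns None on "").

-- ===== PORT A =====
-- A's alphabet literal, verbatim (duplicated 'g', no 'j')
def alphaA : List Char := "abcdefghigklmnopqrstuvwxyz".toList

-- 'for j in l: if c != j: return j' (the inner loop A repeats in each branch)
def firstNeA (c : Char) : List Char → Option Char
  | [] => none
  | j :: rest => if c ≠ j then some j else firstNeA c rest

-- the 'for i in range(0, len(s))' loop of A, branch for branch
def strongLoopA (cs : List Char) (i : Nat) : String :=
  if _h : i < cs.length then
    let current := cs.getD i ' '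
    if i ≠ cs.length - 1 then
      if cs.getD (i + 1) ' ' = current then
        match firstNeA current alphaA with
        | some j => String.mk (cs.take (i + 1) ++ j :: cs.drop (i + 1))
        | none => strongLoopA cs (i + 1)
      else strongLoopA cs (i + 1)
    else
      -- s[i-1]: negative-index-faithful via pyGet? (reached with i = 0 only for len 1, itself unreachable)
      if (PySem.List.pyGet? cs ((i : Int) - 1)).getD ' ' = current then
        match firstNeA current alphaA with
        | some j => String.mk (cs.take (i + 1) ++ j :: cs.drop (i + 1))
        | none => strongLoopA cs (i + 1)
      else
        match firstNeA current alphaA with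
        | some j => String.mk (cs ++ [j])
        | none => strongLoopA cs (i + 1)
  else ""  -- Python falls off and returns None here; only the empty string reaches this (outside Pre_)
termination_by cs.length - i

def strong (s : String) : String :=
  if s.toList.length = 1 then
    match firstNeA (s.toList.getD 0 ' ') alphaA with
    | some j => String.mk [s.toList.getD 0 ' ', j]
    | none => strongLoopA s.toList 0
  else strongLoopA s.toList 0

-- ===== PORT B =====
-- _firstdup: first index i in [lo, hi-1) with s[i] == s[i+1], else None (divide and conquer)
def firstDupB (cs : List Char) (lo hi : Nat) : Option Nat :=
  if hi - lo < 2 then none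
  else  -- mid = (lo + hi) // 2, written inline
    match firstDupB cs lo ((lo + hi) / 2) with
    | some r => some r
    | none =>
      if cs.getD ((lo + hi) / 2 - 1) ' ' = cs.getD ((lo + hi) / 2) ' ' then some ((lo + hi) / 2 - 1)
      else firstDupB cs ((lo + hi) / 2) hi
termination_by hi - lo
decreasing_by all_goals omega

-- "'b' if c == 'a' else 'a'"
def pickClosed (c : Char) : Char := if c = 'a' then 'b' else 'a'

def strong_alt (s : String) : String :=
  if s.toList.isEmpty then ""  -- Source B returns None on the empty string (outside Pre_)
  else
    match firstDupB s.toList 0 s.toList.length with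
    | none =>  -- c = s[-1]
        String.mk (s.toList ++ [pickClosed ((PySem.List.pyGet? s.toList (-1)).getD ' ')])
    | some i =>
        String.mk (s.toList.take (i + 1) ++ pickClosed (s.toList.getD i ' ') :: s.toList.drop (i + 1))

-- ===== PRECONDITION & SPEC =====
-- Pre_ excludes only the empty string, on which A returns None (no String value).
def Pre_strong (s : String) : Prop := s ≠ ""
instance (s : String) : Decidable (Pre_strong s) := by unfold Pre_strong; infer_instance
def pvWitness_strong : String := "aa"

def Spec_strong (s : String) (out : String) : Prop := out = strong_alt s
instance (s : String) (out : String) : Decidable (Spec_strong s out) := by unfold Spec_strong; infer_instance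

-- ===== CLAIM =====
def Claim_equal_strong : Prop := ∀ (s : String), Dom_strong s → Pre_strong s → Spec_strong s (strong s)

-- ===== LEMMAS AND PROOFS =====

-- the adjacent-duplicate predicate
def dupP (cs : List Char) (i : Nat) : Bool := cs.getD i ' ' = cs.getD (i + 1) ' '

-- A's inner loop on A's alphabet always finds the closed-form character.
lemma firstNeA_alpha (c : Char) : firstNeA c alphaA = some (pickClosed c) := by
  by_cases h : c = 'a'
  · subst h; decide
  · simp [alphaA, firstNeA, pickClosed, h]

-- B's divide-and-conquer search is the first match over the index range.
lemma firstDupB_eq_find (cs : List Char) : ∀ (n lo hi : Nat), hi - lo = n →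
    firstDupB cs lo hi = (List.range' lo (hi - lo - 1)).find? (dupP cs) := by
  intro n
  induction n using Nat.strong_induction_on with
  | _ n ih =>
    intro lo hi hn
    rw [firstDupB]
    by_cases h2 : hi - lo < 2
    · rw [if_pos h2]
      have : hi - lo - 1 = 0 := by omega
      simp [this]
    · rw [if_neg h2]
      have hmid1 : lo + 1 ≤ (lo + hi) / 2 := by omega
      have hmid2 : (lo + hi) / 2 + 1 ≤ hi := by omega
      set mid := (lo + hi) / 2 with hmid
      have e1 : List.range' lo (mid - lo - 1) ++ List.range' (lo + (mid - lo - 1)) 1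
          = List.range' lo ((mid - lo - 1) + 1) := List.range'_append_1 ..
      rw [show lo + (mid - lo - 1) = mid - 1 from by omega,
          show (mid - lo - 1) + 1 = mid - lo from by omega] at e1
      have e2 : List.range' lo (mid - lo) ++ List.range' (lo + (mid - lo)) (hi - mid - 1)
          = List.range' lo ((mid - lo) + (hi - mid - 1)) := List.range'_append_1 ..
      rw [show lo + (mid - lo) = mid from by omega,
          show (mid - lo) + (hi - mid - 1) = hi - lo - 1 from by omega] at e2
      have hsplit : List.range' lo (hi - lo - 1) =
          (List.range' lo (mid - lo - 1) ++ List.range' (mid - 1) 1) ++ List.range' mid (hi - mid - 1) := by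
        rw [e1, e2]
      rw [hsplit, List.find?_append, List.find?_append]
      rw [ih (mid - lo) (by omega) lo mid rfl, ih (hi - mid) (by omega) mid hi rfl]
      have hone : List.range' (mid - 1) 1 = [mid - 1] := by simp
      cases hL : (List.range' lo (mid - lo - 1)).find? (dupP cs) with
      | some r => simp [hL]
      | none =>
        by_cases hd : cs.getD (mid - 1) ' ' = cs.getD mid ' '
        · have hp : dupP cs (mid - 1) = true := by
            unfold dupP; rw [show mid - 1 + 1 = mid from by omega]; exact decide_eq_true hd
          have hd' : cs[mid - 1]?.getD ' ' = cs[mid]?.getD ' ' := by simpa [List.getD] using hd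
          simp [hL, hone, List.find?, hp, hd']
        · have hp : dupP cs (mid - 1) = false := by
            unfold dupP; rw [show mid - 1 + 1 = mid from by omega]; exact decide_eq_false hd
          have hd' : ¬ cs[mid - 1]?.getD ' ' = cs[mid]?.getD ' ' := by simpa [List.getD] using hd
          simp [hL, hone, List.find?, hp, hd']

-- the value B builds from the search result
def buildB (cs : List Char) : Option Nat → String
  | none => String.mk (cs ++ [pickClosed (cs.getD (cs.length - 1) ' ')])
  | some i => String.mk (cs.take (i + 1) ++ pickClosed (cs.getD i ' ') :: cs.drop (i + 1))

-- s[-1] of a nonempty list is its element at index len-1.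
lemma pyGet_neg_one_getD (cs : List Char) (hne : cs ≠ []) :
    (PySem.List.pyGet? cs (-1)).getD ' ' = cs.getD (cs.length - 1) ' ' := by
  rw [PySem.List.pyGet?_neg_one]
  rcases cs.eq_nil_or_concat with h | ⟨ys, y, rfl⟩
  · exact absurd h hne
  · simp [List.getD]

-- A's main loop computes buildB of the first-duplicate search from i, given the
-- invariant that the previous pair (if any) is not a duplicate.
lemma loopA_eq_build (cs : List Char) : ∀ (n i : Nat), cs.length - i = n → i < cs.length →
    (i = 0 ∨ dupP cs (i - 1) = false) →
    strongLoopA cs i = buildB cs ((List.range' i (cs.length - 1 - i)).find? (dupP cs)) := by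
  intro n
  induction n with
  | zero => intro i h hi _; omega
  | succ n ih =>
    intro i h hi hinv
    rw [strongLoopA, dif_pos hi]
    by_cases hlast : i = cs.length - 1
    · have h0 : cs.length - 1 - i = 0 := by omega
      rw [h0]
      simp only [List.range'_zero, List.find?_nil]
      rw [if_neg (not_ne_iff.mpr hlast), firstNeA_alpha]
      by_cases hi0 : i = 0
      · -- length 1: s[-1] is s[i] itself, branch inserts after it; same as appending
        have hl1 : cs.length = 1 := by omega
        have : (PySem.List.pyGet? cs ((i : Int) - 1)).getD ' ' = cs.getD i ' ' := by
          rw [hi0]; norm_num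
          rw [pyGet_neg_one_getD cs (by intro hc; simp [hc] at hi)]
          simp [hl1, List.getD]
        rw [if_pos this, buildB]
        have htake : cs.take (cs.length - 1 + 1) = cs := List.take_of_length_le (by omega)
        have hdrop : cs.drop (cs.length - 1 + 1) = [] := List.drop_of_length_le (by omega)
        simp [hlast, htake, hdrop]
      · -- previous pair not duplicate: s[i-1] ≠ s[i]
        have hip : ((i : Int) - 1) = ((i - 1 : Nat) : Int) := by omega
        have hget : (PySem.List.pyGet? cs ((i : Int) - 1)).getD ' ' = cs.getD (i - 1) ' ' := by
          rw [hip, PySem.List.pyGet?_natCast]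
          have : i - 1 < cs.length := by omega
          simp [List.getD, List.getElem?_eq_getElem this]
        rcases hinv with h0 | hdp
        · exact absurd h0 hi0
        · have hne' : ¬ (PySem.List.pyGet? cs ((i : Int) - 1)).getD ' ' = cs.getD i ' ' := by
            rw [hget]; unfold dupP at hdp
            have : i - 1 + 1 = i := by omega
            rw [this] at hdp; simpa using hdp
          rw [if_neg hne', buildB, hlast]

    · have hi1 : i + 1 < cs.length := by omega
      have hrange : cs.length - 1 - i = (cs.length - 1 - (i + 1)) + 1 := by omega
      rw [hrange, List.range'_succ, List.find?_cons]
      simp only [hlast, ne_eq, not_false_eq_true, if_true, firstNeA_alpha]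
      by_cases hd : cs.getD (i + 1) ' ' = cs.getD i ' '
      · have hp : dupP cs i = true := by unfold dupP; exact decide_eq_true hd.symm
        rw [if_pos hd, hp, buildB]
      · have hp : dupP cs i = false := by
          unfold dupP; simp; intro e; exact hd e.symm
        rw [if_neg hd, hp]
        exact ih (i + 1) (by omega) hi1 (Or.inr (by simpa using hp))

theorem strong_spec : Claim_equal_strong := by
  unfold Claim_equal_strong Spec_strong
  intro s _ hpre
  have hne : s.toList ≠ [] := fun h => hpre (String.toList_eq_nil_iff.mp h)
  have hlen : 0 < s.toList.length := List.length_pos_iff.mpr hne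
  have hE : s.toList.isEmpty = false := by simp [List.isEmpty_eq_false_iff, hne]
  set cs := s.toList with hcs
  -- B's result as buildB of the search
  have hBfind : firstDupB cs 0 cs.length = (List.range' 0 (cs.length - 1)).find? (dupP cs) := by
    have := firstDupB_eq_find cs cs.length 0 cs.length (by omega)
    simpa using this
  have hB : strong_alt s = buildB cs ((List.range' 0 (cs.length - 1)).find? (dupP cs)) := by
    unfold strong_alt
    rw [show s.toList = cs from rfl, hE]
    simp only [Bool.false_eq_true, if_false, hBfind]
    cases hf : (List.range' 0 (cs.length - 1)).find? (dupP cs) with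
    | none => rw [buildB, pyGet_neg_one_getD cs hne]
    | some i => rw [buildB]
  rw [hB]
  unfold strong
  rw [show s.toList = cs from rfl]
  by_cases h1 : cs.length = 1
  · rw [if_pos h1, firstNeA_alpha]
    have h0 : cs.length - 1 = 0 := by omega
    rw [h0]
    simp only [List.range'_zero, List.find?_nil, buildB, h0]
    obtain ⟨c, hc⟩ : ∃ c, cs = [c] := by
      cases hx : cs with
      | nil => rw [hx] at h1; simp at h1
      | cons a t => cases t with
        | nil => exact ⟨a, rfl⟩
        | cons b u => rw [hx] at h1; simp at h1
    rw [hc]; rfl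
  · rw [if_neg h1]
    have := loopA_eq_build cs cs.length 0 (by omega) hlen (Or.inl rfl)
    simpa using this
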